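-- pv_equiv track=rewrite | github.com/naserkesetovic/py_snippets | ical.py | get_longest_column
-- ===== SOURCE A (Python) =====
-- def get_longest_column(events):
--     longest = {}
--     for event in events:
--         for key in event:
--             longest[key] = 0
--
--     for event in events:
--         for key in event:
--             if len(str(event[key])) > longest[key]:
--                 longest[key] = len(str(event[key]))
--
--     return longest
-- ===== SOURCE B (Python) =====
-- def get_longest_column(events):
--     groups = {}
--     for event in events:
--         for key in event:
--             groups.setdefault(key, []).append(len(str(event[key])))
--     return {key: max(lengths) for key, lengths in groups.items()}
-- ===== Notes on version B (the rewrite author's own statement) =====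
-- stated objective: alternative
-- what changed: Replaces A's two-pass running-max dict (zero-initialise every key, then conditionally overwrite with larger lengths) by a group-then-aggregate decomposition: one pass collects every stringified length per key into per-key lists via dict.setdefault and append, then a comprehension reduces each group with max.
import Mathlib
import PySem

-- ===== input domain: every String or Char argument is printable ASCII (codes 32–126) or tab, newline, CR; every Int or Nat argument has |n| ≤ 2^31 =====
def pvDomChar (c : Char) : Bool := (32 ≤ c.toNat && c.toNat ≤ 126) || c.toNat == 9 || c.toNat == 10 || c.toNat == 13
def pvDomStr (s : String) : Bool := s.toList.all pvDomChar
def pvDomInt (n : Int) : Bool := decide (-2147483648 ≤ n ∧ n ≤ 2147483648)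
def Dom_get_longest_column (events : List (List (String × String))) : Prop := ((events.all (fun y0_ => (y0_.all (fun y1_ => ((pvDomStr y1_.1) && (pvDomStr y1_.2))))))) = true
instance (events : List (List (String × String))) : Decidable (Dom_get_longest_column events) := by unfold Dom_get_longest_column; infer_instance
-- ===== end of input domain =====

-- B replaces A's two-pass running-max dict by a group-then-aggregate decomposition: one pass
-- collects every stringified length per key into groups, then each group is reduced with max;
-- same return value (alternative decomposition).


-- ===== PORT A =====
-- 'for key in event' iterates the dict's keys; 'event[key]' is the dict lookup (first match);
-- 'len(str(v))' on a string value is PySem.Str.len v.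
def get_longest_column (events : List (List (String × String))) : List (String × Int) :=
  let longest : PySem.Dict String Int :=
    events.foldl (fun longest event =>
      event.foldl (fun longest kv => longest.insert kv.1 0) longest) PySem.Dict.empty
  let longest : PySem.Dict String Int :=
    events.foldl (fun longest event =>
      event.foldl (fun longest kv =>
        if PySem.Str.len ((PySem.Dict.mk event).getD kv.1 "") > longest.getD kv.1 0 then
          longest.insert kv.1 (PySem.Str.len ((PySem.Dict.mk event).getD kv.1 ""))
        else longest) longest) longest
  longest.items

-- ===== PORT B =====
-- group-then-aggregate: the setdefault-and-append grouping is Dict.modify with an empty-list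
-- default; the final comprehension folds insert over groups.items; max(lengths) on the (always
-- nonempty) group is PySem.List.max? with getD 0 for the unreachable empty case.
def get_longest_column_alt (events : List (List (String × String))) : List (String × Int) :=
  let groups : PySem.Dict String (List Int) :=
    events.foldl (fun groups event =>
      event.foldl (fun groups kv =>
        groups.modify kv.1 [] (· ++ [PySem.Str.len ((PySem.Dict.mk event).getD kv.1 "")])) groups)
      PySem.Dict.empty
  (groups.items.foldl
    (fun d p => d.insert p.1 ((PySem.List.max? p.2 (fun x => x)).getD 0))
    (PySem.Dict.empty : PySem.Dict String Int)).items

-- ===== PRECONDITION & SPEC =====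
def Spec_get_longest_column (events : List (List (String × String))) (out : List (String × Int)) : Prop := out = get_longest_column_alt events
instance (events : List (List (String × String))) (out : List (String × Int)) : Decidable (Spec_get_longest_column events out) := by unfold Spec_get_longest_column; infer_instance

-- ===== CLAIM (what is proved, stated in full; the proofs are below) =====
def Claim_equal_get_longest_column : Prop := ∀ (events : List (List (String × String))), Dom_get_longest_column events → Spec_get_longest_column events (get_longest_column events)

-- ===== LEMMAS AND PROOFS =====

-- the (key, length) pair a loop iteration of A works with
def pvPair (event : List (String × String)) (kv : String × String) : String × Int :=
  (kv.1, PySem.Str.len ((PySem.Dict.mk event).getD kv.1 ""))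

def pvPairs (events : List (List (String × String))) : List (String × Int) :=
  events.flatMap (fun ev => ev.map (pvPair ev))

-- A's second loop, over the flattened pair list
def pvStepA (d : PySem.Dict String Int) (p : String × Int) : PySem.Dict String Int :=
  if p.2 > d.getD p.1 0 then d.insert p.1 p.2 else d

-- B's dedup fold over a key list, started from ks
def pvDedupF (ks : List String) (l : List String) : List String :=
  l.foldl (fun ks k => if ks.contains k then ks else ks ++ [k]) ks

-- the values the flattened pair list carries at key k
def pvVals (Q : List (String × Int)) (k : String) : List Int :=
  (Q.filter (fun p => p.1 == k)).map (·.2)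

theorem pvA_eq (events : List (List (String × String))) :
    get_longest_column events =
      ((pvPairs events).foldl pvStepA
        ((pvPairs events).foldl (fun d p => d.insert p.1 0) PySem.Dict.empty)).items := by
  simp [get_longest_column, pvPairs, List.foldl_flatMap, List.foldl_map, pvStepA, pvPair]

def pvGroups (events : List (List (String × String))) : PySem.Dict String (List Int) :=
  (pvPairs events).foldl (fun g p => g.modify p.1 [] (· ++ [p.2])) PySem.Dict.empty

theorem pvB_eq (events : List (List (String × String))) :
    get_longest_column_alt events =
      ((pvGroups events).items.foldl
        (fun d p => d.insert p.1 ((PySem.List.max? p.2 (fun x => x)).getD 0))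
        (PySem.Dict.empty : PySem.Dict String Int)).items := by
  simp [get_longest_column_alt, pvGroups, pvPairs, List.foldl_flatMap, List.foldl_map, pvPair]

theorem pv_update_eq_dedup : ∀ (l ks : List String), PySem.Set.update ks l = pvDedupF ks l := by
  intro l
  induction l with
  | nil => intro ks; rfl
  | cons k t ih =>
    intro ks
    rw [PySem.Set.update_cons, ih]
    show pvDedupF (PySem.Set.add ks k) t = pvDedupF (if ks.contains k then ks else ks ++ [k]) t
    have hadd : PySem.Set.add ks k = if ks.contains k then ks else ks ++ [k] := by
      rw [PySem.Set.add_eq_ite]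
      by_cases hm : k ∈ ks
      · rw [if_pos hm, if_pos (by simpa using hm)]
      · rw [if_neg hm, if_neg (by simpa using hm)]
    rw [hadd]

theorem pv_max_eq (l : List Int) (hne : l ≠ []) (hnn : ∀ x ∈ l, 0 ≤ x) :
    (PySem.List.max? l (fun x => x)).getD 0 = l.foldl max 0 := by
  cases l with
  | nil => exact absurd rfl hne
  | cons x t =>
    rw [PySem.List.max?_id_cons, Option.getD_some, List.foldl_cons,
      max_eq_right (hnn x (by simp))]

theorem pv_pairs_nonneg (events : List (List (String × String))) :
    ∀ p ∈ pvPairs events, 0 ≤ p.2 := by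
  intro p hp
  simp only [pvPairs, List.mem_flatMap, List.mem_map] at hp
  obtain ⟨ev, _, kv, _, rfl⟩ := hp
  simp [pvPair, PySem.Str.len_eq]

theorem pv_vals_nonneg (events : List (List (String × String))) (k : String) :
    ∀ x ∈ pvVals (pvPairs events) k, 0 ≤ x := by
  intro x hx
  simp only [pvVals, List.mem_map, List.mem_filter] at hx
  obtain ⟨p, ⟨hp, _⟩, rfl⟩ := hx
  exact pv_pairs_nonneg events p hp

theorem pv_vals_ne_nil (P : List (String × Int)) (k : String) (h : k ∈ P.map (·.1)) :
    pvVals P k ≠ [] := by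
  obtain ⟨p, hp, hpk⟩ := List.mem_map.mp h
  have : p ∈ P.filter (fun p => p.1 == k) := List.mem_filter.mpr ⟨hp, by simp [hpk]⟩
  simp only [pvVals, ne_eq, List.map_eq_nil_iff]
  exact fun hnil => by rw [hnil] at this; cases this

theorem pv_dedup_nodup : ∀ (l ks : List String), ks.Nodup → (pvDedupF ks l).Nodup := by
  intro l
  induction l with
  | nil => intro ks h; exact h
  | cons k t ih =>
    intro ks h
    show (pvDedupF (if ks.contains k then ks else ks ++ [k]) t).Nodup
    by_cases hc : ks.contains k = true
    · rw [if_pos hc]; exact ih ks h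
    · rw [if_neg hc]
      refine ih _ ?_
      have hk : k ∉ ks := by simpa using hc
      refine List.Nodup.append h (by simp) ?_
      intro a ha hb
      simp only [List.mem_singleton] at hb
      exact hk (hb ▸ ha)

theorem pv_dedup_mem_start : ∀ (l ks : List String) (x : String), x ∈ ks → x ∈ pvDedupF ks l := by
  intro l
  induction l with
  | nil => intro ks x h; exact h
  | cons k t ih =>
    intro ks x h
    show x ∈ pvDedupF (if ks.contains k then ks else ks ++ [k]) t
    by_cases hc : ks.contains k = true
    · rw [if_pos hc]; exact ih ks x h
    · rw [if_neg hc]; exact ih _ x (by simp [h])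

theorem pv_dedup_mem : ∀ (l ks : List String) (x : String), x ∈ l → x ∈ pvDedupF ks l := by
  intro l
  induction l with
  | nil => intro ks x h; cases h
  | cons k t ih =>
    intro ks x h
    show x ∈ pvDedupF (if ks.contains k then ks else ks ++ [k]) t
    rcases List.mem_cons.mp h with hx | hx
    · by_cases hc : ks.contains k = true
      · rw [if_pos hc]; exact pv_dedup_mem_start t ks x (by rw [hx]; simpa using hc)
      · rw [if_neg hc]; exact pv_dedup_mem_start t _ x (by simp [hx])
    · exact ih _ x hx

theorem pv_init : ∀ (Q : List (String × Int)) (ks : List String), ks.Nodup →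
    Q.foldl (fun d p => d.insert p.1 0) (PySem.Dict.mk (ks.map (fun k => (k, (0 : Int))))) =
      PySem.Dict.mk ((pvDedupF ks (Q.map (·.1))).map (fun k => (k, 0))) := by
  intro Q
  induction Q with
  | nil => intro ks _; rfl
  | cons p Q ih =>
    intro ks hnd
    have hcont : (PySem.Dict.mk (ks.map (fun k => (k, (0 : Int))))).contains p.1 = ks.contains p.1 := by
      simp [PySem.Dict.contains_mk, List.any_map, Function.comp_def, List.any_beq']
    by_cases hm : p.1 ∈ ks
    · have hc : ks.contains p.1 = true := by simpa using hm
      have hstep : (PySem.Dict.mk (ks.map (fun k => (k, (0 : Int))))).insert p.1 0 =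
          PySem.Dict.mk (ks.map (fun k => (k, (0 : Int)))) := by
        apply PySem.Dict.ext
        rw [PySem.Dict.items_insert, if_pos (by rw [hcont]; exact hc)]
        show (ks.map _).map _ = _
        rw [List.map_map]
        apply List.map_congr_left
        intro k _
        by_cases hk : k = p.1 <;> simp [hk]
      show Q.foldl _ ((PySem.Dict.mk (ks.map (fun k => (k, (0:Int))))).insert p.1 0) =
        PySem.Dict.mk ((pvDedupF (if ks.contains p.1 then ks else ks ++ [p.1]) (Q.map (·.1))).map (fun k => (k, 0)))
      rw [hstep, if_pos hc]
      exact ih ks hnd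
    · have hc : ks.contains p.1 = false := by simpa using hm
      have hstep : (PySem.Dict.mk (ks.map (fun k => (k, (0 : Int))))).insert p.1 0 =
          PySem.Dict.mk ((ks ++ [p.1]).map (fun k => (k, (0 : Int)))) := by
        apply PySem.Dict.ext
        rw [PySem.Dict.items_insert, if_neg (by rw [hcont, hc]; simp)]
        simp
      show Q.foldl _ ((PySem.Dict.mk (ks.map (fun k => (k, (0:Int))))).insert p.1 0) =
        PySem.Dict.mk ((pvDedupF (if ks.contains p.1 then ks else ks ++ [p.1]) (Q.map (·.1))).map (fun k => (k, 0)))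
      rw [hstep, if_neg (by simpa using hm : ¬ ks.contains p.1 = true)]
      refine ih (ks ++ [p.1]) ?_
      refine List.Nodup.append hnd (by simp) ?_
      intro a ha hb
      simp only [List.mem_singleton] at hb
      exact hm (hb ▸ ha)

theorem pv_main : ∀ (Q : List (String × Int)) (d : PySem.Dict String Int),
    d.keys.Nodup → (∀ p ∈ Q, d.contains p.1 = true) →
    (Q.foldl pvStepA d).items = d.items.map (fun q => (q.1, (pvVals Q q.1).foldl max q.2)) := by
  intro Q
  induction Q with
  | nil =>
    intro d _ _
    simp [pvVals]
  | cons p Q ih =>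
    intro d hnd hin
    obtain ⟨k, v⟩ := p
    have hc : d.contains k = true := hin (k, v) (by simp)
    have hitems : (pvStepA d (k, v)).items =
        d.items.map (fun q => if q.1 == k then (q.1, max q.2 v) else q) := by
      unfold pvStepA
      by_cases hgt : v > d.getD k 0
      · rw [if_pos hgt, PySem.Dict.items_insert, if_pos hc]
        apply List.map_congr_left
        intro q hq
        by_cases hk : q.1 = k
        · have hq2 : d.getD k 0 = q.2 := by
            have : (q.1, q.2) ∈ d.items := by simpa using hq
            rw [← hk]; exact PySem.Dict.getD_of_mem_items d this hnd 0
          simp only [hk, beq_self_eq_true, if_true]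
          rw [max_eq_right (by omega)]
        · simp [hk]
      · rw [if_neg hgt]
        symm
        calc d.items.map (fun q => if q.1 == k then (q.1, max q.2 v) else q)
            = d.items.map id := by
              apply List.map_congr_left
              intro q hq
              by_cases hk : q.1 = k
              · have hq2 : d.getD k 0 = q.2 := by
                  have : (q.1, q.2) ∈ d.items := by simpa using hq
                  rw [← hk]; exact PySem.Dict.getD_of_mem_items d this hnd 0
                simp only [hk, beq_self_eq_true, if_true, id]
                rw [max_eq_left (by omega), ← hk]
              · simp [hk]
          _ = d.items := List.map_id d.items
    have hkeys : (pvStepA d (k, v)).keys = d.keys := by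
      simp only [PySem.Dict.keys, hitems, List.map_map]
      apply List.map_congr_left
      intro q _
      by_cases hk : q.1 = k <;> simp [hk]
    have hnd' : (pvStepA d (k, v)).keys.Nodup := hkeys ▸ hnd
    have hin' : ∀ p ∈ Q, (pvStepA d (k, v)).contains p.1 = true := by
      intro p hp
      rw [PySem.Dict.contains_eq_decide_mem_keys, hkeys,
        ← PySem.Dict.contains_eq_decide_mem_keys]
      exact hin p (by simp [hp])
    rw [List.foldl_cons, ih (pvStepA d (k, v)) hnd' hin', hitems, List.map_map]
    apply List.map_congr_left
    intro q _
    by_cases hk : q.1 = k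
    · have hvals : pvVals ((k, v) :: Q) k = v :: pvVals Q k := by
        simp [pvVals]
      simp [hk, hvals, List.foldl_cons]
    · have hvals : pvVals ((k, v) :: Q) q.1 = pvVals Q q.1 := by
        simp [pvVals, (by simp [Ne.symm hk] : (k == q.1) = false)]
      simp [hk, hvals]

theorem pv_dedup_subset : ∀ (l : List String) (x : String), x ∈ pvDedupF [] l → x ∈ l := by
  have gen : ∀ (l ks : List String) (x : String), x ∈ pvDedupF ks l → x ∈ ks ∨ x ∈ l := by
    intro l
    induction l with
    | nil => intro ks x h; exact Or.inl h
    | cons k t ih =>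
      intro ks x h
      have h' : x ∈ pvDedupF (if ks.contains k then ks else ks ++ [k]) t := h
      rcases ih _ x h' with hx | hx
      · by_cases hc : ks.contains k = true
        · rw [if_pos hc] at hx; exact Or.inl hx
        · rw [if_neg hc] at hx
          rcases List.mem_append.mp hx with hx | hx
          · exact Or.inl hx
          · simp only [List.mem_singleton] at hx; exact Or.inr (by simp [hx])
      · exact Or.inr (by simp [hx])
  intro l x h
  rcases gen l [] x h with hx | hx
  · cases hx
  · exact hx

-- ===== VERDICT (by name: the statement is the Claim_ definition above) =====
theorem get_longest_column_spec : Claim_equal_get_longest_column := by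
  intro events _
  show get_longest_column events = get_longest_column_alt events
  rw [pvA_eq, pvB_eq]
  have hinit : (pvPairs events).foldl (fun d p => d.insert p.1 0) (PySem.Dict.empty : PySem.Dict String Int)
      = PySem.Dict.mk ((pvDedupF [] ((pvPairs events).map (·.1))).map (fun k => (k, (0:Int)))) :=
    pv_init (pvPairs events) [] List.nodup_nil
  rw [hinit]
  have hndD : (pvDedupF [] ((pvPairs events).map (·.1))).Nodup :=
    pv_dedup_nodup _ [] List.nodup_nil
  have hkeys : (PySem.Dict.mk ((pvDedupF [] ((pvPairs events).map (·.1))).map (fun k => (k, (0:Int))))).keys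
      = pvDedupF [] ((pvPairs events).map (·.1)) := by
    rw [PySem.Dict.keys_mk, List.map_map]
    exact List.map_id _
  rw [pv_main (pvPairs events) _ (by rw [hkeys]; exact hndD)
      (fun p hp => by
        rw [PySem.Dict.contains_eq_decide_mem_keys, hkeys]
        simp only [decide_eq_true_eq]
        exact pv_dedup_mem _ [] p.1 (List.mem_map_of_mem hp))]
  rw [show (PySem.Dict.mk ((pvDedupF [] ((pvPairs events).map (·.1))).map (fun k => (k, (0:Int))))).items
        = (pvDedupF [] ((pvPairs events).map (·.1))).map (fun k => (k, (0:Int))) from rfl,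
      List.map_map]
  -- the B side: characterise the groups dict and the final insert fold
  have hGkeys : (pvGroups events).keys = pvDedupF [] ((pvPairs events).map (·.1)) := by
    rw [pvGroups, PySem.Dict.keys_foldl_modify_key, PySem.Dict.keys_empty,
      pv_update_eq_dedup]
  have hGnd : (pvGroups events).keys.Nodup := by rw [hGkeys]; exact hndD
  have hGgetD : ∀ k, (pvGroups events).getD k [] = pvVals (pvPairs events) k := by
    intro k
    rw [pvGroups, PySem.Dict.getD_foldl_modify_append, PySem.Dict.getD_empty]
    rfl
  have hGitems : (pvGroups events).items =
      (pvDedupF [] ((pvPairs events).map (·.1))).map (fun k => (k, pvVals (pvPairs events) k)) := by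
    rw [PySem.Dict.items_eq_map_keys (pvGroups events) hGnd [], hGkeys]
    exact List.map_congr_left (fun k _ => by rw [hGgetD])
  have hfresh : ((pvGroups events).items.foldl
      (fun d p => d.insert p.1 ((PySem.List.max? p.2 (fun x => x)).getD 0))
      (PySem.Dict.empty : PySem.Dict String Int)).items =
      (PySem.Dict.empty : PySem.Dict String Int).items ++
        (pvGroups events).items.map (fun p => (p.1, (PySem.List.max? p.2 (fun x => x)).getD 0)) :=
    PySem.Dict.items_foldl_insert_fresh (pvGroups events).items (fun p => p.1)
      (fun p => (PySem.List.max? p.2 (fun x => x)).getD 0) PySem.Dict.empty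
      (fun a _ => PySem.Dict.contains_empty (ν := Int) a.1) hGnd
  rw [hfresh, hGitems, List.map_map]
  show _ = [] ++ _
  rw [List.nil_append]
  apply List.map_congr_left
  intro k hk
  show (k, (pvVals (pvPairs events) k).foldl max 0) =
    (k, (PySem.List.max? (pvVals (pvPairs events) k) (fun x => x)).getD 0)
  have hne : pvVals (pvPairs events) k ≠ [] :=
    pv_vals_ne_nil (pvPairs events) k (pv_dedup_subset _ k hk)
  rw [pv_max_eq _ hne (pv_vals_nonneg events k)]
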